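-- pv_equiv track=rewrite | github.com/uniqueNullptr2/aoc24 | day15.py | transform_map
-- ===== SOURCE A (Python) =====
-- def transform_map(m):
--     x = 0
--     y = 0
--     m2 = []
--     for l in m:
--         tmp = []
--         for ch in l:
--             if ch == "#":
--                 tmp += ["#","#"]
--             elif ch == ".":
--                 tmp += [".","."]
--             elif ch == "O":
--                 tmp += ["[","]"]
--             else:
--                 x = len(tmp)
--                 y = len(m2)
--                 tmp += ["@", "."]
--         m2.append(tmp)
--     return x,y,m2
-- ===== SOURCE B (Python) =====
-- EXP = {"#": "##", ".": "..", "O": "[]"}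
--
-- def transform_map(m):
--     m2 = [[c for ch in l for c in EXP.get(ch, "@.")] for l in m]
--     x = y = 0
--     for i, row in enumerate(m2):
--         for j, cell in enumerate(row):
--             if cell == "@":
--                 x, y = j, i
--     return x, y, m2
-- ===== Notes on version B (the rewrite author's own statement) =====
-- stated objective: idiomatic
-- what changed: Replaces A's single fused pass (expanding cells while recording the robot position via mutable x,y inside the branch chain) with a table-driven expansion comprehension (EXP dict) followed by a separate enumerate-scan of the finished map for the last '@' cell.
import Mathlib
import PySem

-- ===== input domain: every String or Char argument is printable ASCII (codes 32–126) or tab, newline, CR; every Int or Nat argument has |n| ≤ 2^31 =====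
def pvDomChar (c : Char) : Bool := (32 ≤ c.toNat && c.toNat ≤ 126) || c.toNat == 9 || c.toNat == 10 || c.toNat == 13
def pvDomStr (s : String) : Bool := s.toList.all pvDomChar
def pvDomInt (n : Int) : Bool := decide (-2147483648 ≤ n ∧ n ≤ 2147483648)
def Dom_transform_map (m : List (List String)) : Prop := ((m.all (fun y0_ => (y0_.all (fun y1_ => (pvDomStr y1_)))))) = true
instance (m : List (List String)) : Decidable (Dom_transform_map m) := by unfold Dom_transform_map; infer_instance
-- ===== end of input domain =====

-- B replaces A's fused expand-and-track pass by a table-driven expansion plus a separate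
-- scan for the last '@' cell (same cost; a different decomposition).

-- ===== PORT A =====
-- inner loop body of A: branch chain over the cell, recording x=len(tmp), y=k at the else branch
def pvStepA (k : Int) (st : Int × Int × List String) (ch : String) : Int × Int × List String :=
  if ch = "#" then (st.1, st.2.1, st.2.2 ++ ["#", "#"])
  else if ch = "." then (st.1, st.2.1, st.2.2 ++ [".", "."])
  else if ch = "O" then (st.1, st.2.1, st.2.2 ++ ["[", "]"])
  else ((st.2.2.length : Int), k, st.2.2 ++ ["@", "."])

def transform_map (m : List (List String)) : Int × Int × List (List String) :=
  m.foldl (fun (st : Int × Int × List (List String)) l =>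
    let r := l.foldl (pvStepA (st.2.2.length : Int)) (st.1, st.2.1, [])
    (r.1, r.2.1, st.2.2 ++ [r.2.2])) (0, 0, [])

-- ===== PORT B =====
-- EXP.get(ch, "@.") as a list of single-character strings (iterating the 2-char string)
def pvExp (ch : String) : List String :=
  if ch = "#" then ["#", "#"]
  else if ch = "." then [".", "."]
  else if ch = "O" then ["[", "]"]
  else ["@", "."]

def transform_map_alt (m : List (List String)) : Int × Int × List (List String) :=
  let m2 := m.map (fun l => l.flatMap pvExp)
  let p := (PySem.List.enumerate m2 0).foldl
    (fun (p : Int × Int) ir =>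
      (PySem.List.enumerate ir.2 0).foldl
        (fun (p : Int × Int) jc => if jc.2 = "@" then (jc.1, ir.1) else p) p) (0, 0)
  (p.1, p.2, m2)

-- ===== PRECONDITION & SPEC =====
def Spec_transform_map (m : List (List String)) (out : Int × Int × List (List String)) : Prop := out = transform_map_alt m
instance (m : List (List String)) (out : Int × Int × List (List String)) : Decidable (Spec_transform_map m out) := by unfold Spec_transform_map; infer_instance

-- ===== CLAIM (what is proved, stated in full; the proofs are below) =====
def Claim_equal_transform_map : Prop := ∀ (m : List (List String)), Dom_transform_map m → Spec_transform_map m (transform_map m)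

-- ===== LEMMAS AND PROOFS =====

-- Row lemma: A's inner fold over a row equals B's scan of the expanded row (indexed from tmp.length).
theorem pv_row (k : Int) (l : List String) (x y : Int) (tmp : List String) :
    l.foldl (pvStepA k) (x, y, tmp) =
      (((PySem.List.enumerate (l.flatMap pvExp) (tmp.length : Int)).foldl
          (fun (p : Int × Int) jc => if jc.2 = "@" then (jc.1, k) else p) (x, y)).1,
       ((PySem.List.enumerate (l.flatMap pvExp) (tmp.length : Int)).foldl
          (fun (p : Int × Int) jc => if jc.2 = "@" then (jc.1, k) else p) (x, y)).2,
       tmp ++ l.flatMap pvExp) := by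
  induction l generalizing x y tmp with
  | nil => simp [PySem.List.enumerate_nil]
  | cons ch l ih =>
    by_cases h1 : ch = "#"
    · simp only [List.foldl_cons, pvStepA, h1, List.flatMap_cons, pvExp]
      rw [ih]
      simp [PySem.List.enumerate_cons]
      constructor <;> congr 2
    · by_cases h2 : ch = "."
      · simp only [List.foldl_cons, pvStepA, h2, List.flatMap_cons, pvExp]
        rw [ih]
        simp [PySem.List.enumerate_cons]
        constructor <;> congr 2
      · by_cases h3 : ch = "O"
        · simp only [List.foldl_cons, pvStepA, h3, List.flatMap_cons, pvExp]
          rw [ih]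
          simp [PySem.List.enumerate_cons]
          constructor <;> congr 2
        · simp only [List.foldl_cons, pvStepA, h1, h2, h3, List.flatMap_cons, pvExp]
          rw [ih]
          simp [PySem.List.enumerate_cons]
          constructor <;> congr 2

-- Outer lemma: A's fold over rows equals B's scan of the expanded map (rows indexed from m2.length).
theorem pv_outer (m : List (List String)) (x y : Int) (m2 : List (List String)) :
    m.foldl (fun (st : Int × Int × List (List String)) l =>
        let r := l.foldl (pvStepA (st.2.2.length : Int)) (st.1, st.2.1, [])
        (r.1, r.2.1, st.2.2 ++ [r.2.2])) (x, y, m2) =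
      (((PySem.List.enumerate (m.map (fun l => l.flatMap pvExp)) (m2.length : Int)).foldl
          (fun (p : Int × Int) ir =>
            (PySem.List.enumerate ir.2 0).foldl
              (fun (p : Int × Int) jc => if jc.2 = "@" then (jc.1, ir.1) else p) p) (x, y)).1,
       ((PySem.List.enumerate (m.map (fun l => l.flatMap pvExp)) (m2.length : Int)).foldl
          (fun (p : Int × Int) ir =>
            (PySem.List.enumerate ir.2 0).foldl
              (fun (p : Int × Int) jc => if jc.2 = "@" then (jc.1, ir.1) else p) p) (x, y)).2,
       m2 ++ m.map (fun l => l.flatMap pvExp)) := by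
  induction m generalizing x y m2 with
  | nil => simp [PySem.List.enumerate_nil]
  | cons l m ih =>
    simp only [List.foldl_cons, List.map_cons]
    rw [pv_row, ih]
    simp [PySem.List.enumerate_cons]

-- ===== VERDICT (by name: the statement is the Claim_ definition above) =====
theorem transform_map_spec : Claim_equal_transform_map := by
  intro m _
  unfold Spec_transform_map transform_map transform_map_alt
  rw [pv_outer]
  simp
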